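-- pv_equiv track=rewrite | github.com/xFlodz/Places-of-interest | text_editor.py | put_notes
-- ===== SOURCE A (Python) =====
-- def put_notes(images_list, old_notes):
--     n = 0
--     new_list = images_list.copy()
--     for i in range(len(new_list)):
--         if new_list[i] != '':
--             new_list[i] = old_notes[n]
--             n+=1
--     return new_list
-- ===== SOURCE B (Python) =====
-- def put_notes(images_list, old_notes):
--     m = sum(1 for v in images_list if v != '')
--     out = []
--     k = m
--     for v in reversed(images_list):
--         if v != '':
--             k -= 1
--             out.append(old_notes[k])
--         else:
--             out.append(v)
--     out.reverse()
--     return out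
-- ===== Notes on version B (the rewrite author's own statement) =====
-- stated objective: alternative
-- what changed: B builds the result back-to-front: it first counts the non-empty slots, then scans images_list in reverse consuming old_notes from index m-1 downward, and reverses the accumulated output, instead of A's forward scan with an advancing counter.
import Mathlib
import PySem

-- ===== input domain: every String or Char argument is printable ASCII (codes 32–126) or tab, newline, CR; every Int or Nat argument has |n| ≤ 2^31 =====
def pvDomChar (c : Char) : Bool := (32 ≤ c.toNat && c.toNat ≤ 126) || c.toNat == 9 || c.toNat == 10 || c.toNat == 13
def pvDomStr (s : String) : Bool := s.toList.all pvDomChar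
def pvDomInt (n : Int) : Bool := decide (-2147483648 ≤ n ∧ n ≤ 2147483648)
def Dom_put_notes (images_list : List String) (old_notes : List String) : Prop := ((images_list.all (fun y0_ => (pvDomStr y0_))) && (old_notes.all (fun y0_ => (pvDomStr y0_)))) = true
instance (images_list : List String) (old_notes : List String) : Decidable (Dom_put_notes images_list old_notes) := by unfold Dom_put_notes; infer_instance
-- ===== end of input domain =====

-- B builds the result back-to-front: it counts the non-empty slots, scans images_list in
-- reverse consuming old_notes from index m-1 downward, then reverses the accumulated output.

-- ===== PORT A =====
-- the loop body: on index i, if new_list[i] != '' assign old_notes[n] and bump n.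
-- old_notes[n] would raise IndexError when n is out of range; Pre_ excludes that, so the
-- .getD "" default is unreachable under Pre_.
def put_notes_step (old_notes : List String) (st : Int × List String) (i : Int) : Int × List String :=
  if (PySem.List.pyGet? st.2 i).getD "" ≠ "" then
    (st.1 + 1, st.2.set i.toNat ((PySem.List.pyGet? old_notes st.1).getD ""))
  else st

def put_notes (images_list : List String) (old_notes : List String) : List String :=
  ((PySem.List.pyRange 0 (images_list.length : Int) 1).foldl
    (put_notes_step old_notes) (0, images_list)).2

-- ===== PORT B =====
-- the reverse-loop body: state (k, out); on a non-empty v, decrement k and append old_notes[k],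
-- else append v.  old_notes[k] would raise IndexError when k is out of range; Pre_ excludes
-- that, so the .getD "" default is unreachable under Pre_.
def put_notes_alt_step (old_notes : List String) (st : Int × List String) (v : String) : Int × List String :=
  if v ≠ "" then (st.1 - 1, st.2 ++ [(PySem.List.pyGet? old_notes (st.1 - 1)).getD ""])
  else (st.1, st.2 ++ [v])

def put_notes_alt (images_list : List String) (old_notes : List String) : List String :=
  let m := images_list.foldl (fun a v => if v ≠ "" then a + 1 else a) (0 : Int)
  ((images_list.reverse.foldl (put_notes_alt_step old_notes) (m, [])).2).reverse

-- ===== PRECONDITION & SPEC =====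
-- Pre_ excludes exactly the inputs on which A raises IndexError: more non-empty slots than notes.
def Pre_put_notes (images_list : List String) (old_notes : List String) : Prop :=
  (images_list.filter (fun s => s ≠ "")).length ≤ old_notes.length
instance (images_list : List String) (old_notes : List String) : Decidable (Pre_put_notes images_list old_notes) := by unfold Pre_put_notes; infer_instance

def pvWitness_put_notes : List String × List String := (["a", "", "b"], ["x", "y"])

def Spec_put_notes (images_list : List String) (old_notes : List String) (out : List String) : Prop := out = put_notes_alt images_list old_notes
instance (images_list : List String) (old_notes : List String) (out : List String) : Decidable (Spec_put_notes images_list old_notes out) := by unfold Spec_put_notes; infer_instance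

-- ===== CLAIM (what is proved, stated in full; the proofs are below) =====
def Claim_equal_put_notes : Prop := ∀ (images_list : List String) (old_notes : List String), Dom_put_notes images_list old_notes → Pre_put_notes images_list old_notes → Spec_put_notes images_list old_notes (put_notes images_list old_notes)

-- ===== LEMMAS AND PROOFS =====

-- common recursive description both ports are reduced to
def pnRec (images_list : List String) (old_notes : List String) : List String :=
  match images_list with
  | [] => []
  | head :: rest =>
    if head = "" then "" :: pnRec rest old_notes
    else ((PySem.List.pyGet? old_notes 0).getD "") :: pnRec rest (old_notes.drop 1)

lemma pnRec_head_get (notes : List String) (n0 : Nat) (hn0 : n0 < notes.length) :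
    (PySem.List.pyGet? (notes.drop n0) 0).getD "" = notes[n0] := by
  rw [show ((0 : Int)) = ((0 : Nat) : Int) by norm_num, PySem.List.pyGet?_natCast]
  simp [List.getElem?_drop, List.getElem?_eq_getElem hn0]

lemma set_append_length {α : Type} (pre : List α) (h : α) (t : List α) (v : α) :
    (pre ++ h :: t).set pre.length v = pre ++ v :: t := by
  induction pre with
  | nil => rfl
  | cons a p ih => simp [List.set, ih]

-- A's loop on indices [pre.length, pre.length + suf.length) over state (n0, pre ++ suf)
lemma loop_spec (notes : List String) (suf : List String) :
    ∀ (pre : List String) (n0 : Nat),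
    (suf.filter (fun s => s ≠ "")).length ≤ notes.length - n0 →
    (PySem.List.pyRange (pre.length : Int) ((pre.length : Int) + (suf.length : Int)) 1).foldl
        (put_notes_step notes) ((n0 : Int), pre ++ suf)
      = (((n0 + (suf.filter (fun s => s ≠ "")).length : Nat) : Int),
         pre ++ pnRec suf (notes.drop n0)) := by
  induction suf with
  | nil => intro pre n0 _; simp [PySem.List.pyRange_one_eq_nil, pnRec]
  | cons h t ih =>
    intro pre n0 hle
    rw [PySem.List.pyRange_one_cons (by push_cast [List.length_cons]; omega)]
    simp only [List.foldl_cons]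
    have hget : (PySem.List.pyGet? (pre ++ h :: t) (pre.length : Int)).getD "" = h := by
      simp [List.getElem?_append_right (le_refl pre.length)]
    by_cases hh : h = ""
    · have hstep : put_notes_step notes ((n0 : Int), pre ++ h :: t) (pre.length : Int)
          = ((n0 : Int), pre ++ h :: t) := by
        simp [put_notes_step, hget, hh]
      rw [hstep]
      have := ih (pre ++ [h]) n0 (by simpa [List.filter_cons, hh] using hle)
      simp only [List.length_append, List.length_cons, List.length_nil] at this ⊢
      push_cast at this ⊢
      rw [show (pre.length : Int) + ((t.length : Int) + 1) = (pre.length : Int) + 1 + (t.length : Int) by ring]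
      rw [show pre ++ [h] ++ t = pre ++ h :: t by simp] at this
      rw [this]
      simp [pnRec, hh, List.filter_cons, List.append_assoc]
    · have hcnt : ((h :: t).filter (fun s => s ≠ "")).length
          = (t.filter (fun s => s ≠ "")).length + 1 := by
        simp [List.filter_cons, hh]
      have hn0 : n0 < notes.length := by omega
      have hv : (PySem.List.pyGet? notes (n0 : Int)).getD "" = notes[n0] := by
        simp [List.getElem?_eq_getElem hn0]
      have hstep : put_notes_step notes ((n0 : Int), pre ++ h :: t) (pre.length : Int)
          = (((n0 + 1 : Nat) : Int), pre ++ notes[n0] :: t) := by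
        simp only [put_notes_step, hget, if_pos hh, hv, Int.toNat_natCast]
        rw [set_append_length]
        push_cast; rfl
      rw [hstep]
      have := ih (pre ++ [notes[n0]]) (n0 + 1) (by omega)
      simp only [List.length_append, List.length_cons, List.length_nil] at this ⊢
      push_cast at this ⊢
      rw [show (pre.length : Int) + ((t.length : Int) + 1) = (pre.length : Int) + 1 + (t.length : Int) by ring]
      rw [show pre ++ [notes[n0]] ++ t = pre ++ notes[n0] :: t by simp] at this
      rw [this]
      rw [Prod.mk.injEq]
      constructor
      · rw [hcnt]; push_cast; ring
      · simp only [pnRec, hh, if_neg hh, List.drop_drop, pnRec_head_get notes n0 hn0,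
          List.append_assoc, List.singleton_append]
        simp

-- ===== B-side lemmas =====

-- B's first pass (the generator sum) is the filter length
lemma count_foldl (l : List String) : ∀ (a : Int),
    l.foldl (fun a v => if v ≠ "" then a + 1 else a) a
      = a + ((l.filter (fun s => s ≠ "")).length : Int) := by
  induction l with
  | nil => intro a; simp
  | cons h t ih =>
    intro a
    rw [List.foldl_cons]
    by_cases hh : h = ""
    · simpa [List.filter_cons, hh] using ih a
    · simp only [hh, if_neg, ne_eq, not_false_iff, if_pos]
      rw [ih (a + 1)]
      simp only [List.filter_cons, hh]
      simp
      push_cast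
      ring

-- B's reverse loop, started at off + (count of non-empty in l), produces the reversal of
-- pnRec l (notes.drop off) appended to the accumulator, and ends at off.
lemma revloop_spec (notes : List String) (l : List String) :
    ∀ (off : Nat) (acc : List String),
    (l.filter (fun s => s ≠ "")).length + off ≤ notes.length →
    l.reverse.foldl (put_notes_alt_step notes)
        (((off + (l.filter (fun s => s ≠ "")).length : Nat) : Int), acc)
      = ((off : Int), acc ++ (pnRec l (notes.drop off)).reverse) := by
  induction l with
  | nil => intro off acc _; simp [pnRec]
  | cons h t ih =>
    intro off acc hle
    rw [List.reverse_cons, List.foldl_concat]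
    by_cases hh : h = ""
    · have hc : ((h :: t).filter (fun s => s ≠ "")).length
          = (t.filter (fun s => s ≠ "")).length := by simp [List.filter_cons, hh]
      rw [hc, ih off acc (by omega)]
      simp [put_notes_alt_step, hh, pnRec, List.append_assoc]
    · have hc : ((h :: t).filter (fun s => s ≠ "")).length
          = (t.filter (fun s => s ≠ "")).length + 1 := by simp [List.filter_cons, hh]
      have hoff : off < notes.length := by omega
      have hstart : ((off + ((h :: t).filter (fun s => s ≠ "")).length : Nat) : Int)
          = (((off + 1) + (t.filter (fun s => s ≠ "")).length : Nat) : Int) := by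
        rw [hc]; push_cast; ring
      rw [hstart, ih (off + 1) acc (by omega)]
      have hval : (PySem.List.pyGet? notes (((off + 1 : Nat) : Int) - 1)).getD ""
          = notes[off] := by
        rw [show (((off + 1 : Nat) : Int) - 1) = ((off : Nat) : Int) by push_cast; ring,
          PySem.List.pyGet?_natCast]
        simp [List.getElem?_eq_getElem hoff]
      simp only [put_notes_alt_step, if_pos hh, hval]
      have h1 : (((off + 1 : Nat) : Int) - 1) = ((off : Nat) : Int) := by push_cast; ring
      rw [h1]
      refine congrArg (Prod.mk _) ?_
      simp only [pnRec, if_neg hh, pnRec_head_get notes off hoff, List.drop_drop,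
        List.reverse_cons, List.append_assoc]

-- B equals the common recursion whenever the notes suffice
lemma alt_eq_pnRec (images_list : List String) (notes : List String)
    (hpre : (images_list.filter (fun s => s ≠ "")).length ≤ notes.length) :
    put_notes_alt images_list notes = pnRec images_list notes := by
  unfold put_notes_alt
  simp only []
  rw [count_foldl, show ((0 : Int) + ((images_list.filter (fun s => s ≠ "")).length : Int))
      = (((0 + (images_list.filter (fun s => s ≠ "")).length : Nat)) : Int) by push_cast; ring]
  rw [revloop_spec notes images_list 0 [] (by omega)]
  simp

-- ===== VERDICT (by name: the statement is the Claim_ definition above) =====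
theorem put_notes_spec : Claim_equal_put_notes := by
  intro il notes _ hpre
  unfold Spec_put_notes put_notes
  unfold Pre_put_notes at hpre
  rw [alt_eq_pnRec il notes hpre]
  have := loop_spec notes il [] 0 (by simpa using hpre)
  simpa using congrArg Prod.snd this
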